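-- pv_equiv track=rewrite | github.com/NeapolitanIcecream/cremona | src/cremona/core/routing.py | _routing_pressure
-- ===== SOURCE A (Python) =====
-- from typing import Any, Literal, Mapping
--
-- def _routing_pressure(agent_routing_queue: list[dict[str, Any]]) -> str:
--     if any(item["priority_band"] == "investigate_now" for item in agent_routing_queue):
--         return "investigate_now"
--     if any(
--         item["priority_band"] == "investigate_soon" for item in agent_routing_queue
--     ):
--         return "investigate_soon"
--     if agent_routing_queue:
--         return "watch_only"
--     return "none"
-- ===== SOURCE B (Python) =====
-- def _routing_pressure(agent_routing_queue):
--     found_soon = False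
--     for item in agent_routing_queue:
--         band = item["priority_band"]
--         if band == "investigate_now":
--             return "investigate_now"
--         if band == "investigate_soon":
--             found_soon = True
--     if found_soon:
--         return "investigate_soon"
--     if agent_routing_queue:
--         return "watch_only"
--     return "none"
-- ===== Notes on version B (the rewrite author's own statement) =====
-- stated objective: simpler
-- what changed: Replaces the two separate any()-scans (up to two full traversals) with one single pass that early-returns on 'investigate_now' and carries a found_soon flag.
import Mathlib
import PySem

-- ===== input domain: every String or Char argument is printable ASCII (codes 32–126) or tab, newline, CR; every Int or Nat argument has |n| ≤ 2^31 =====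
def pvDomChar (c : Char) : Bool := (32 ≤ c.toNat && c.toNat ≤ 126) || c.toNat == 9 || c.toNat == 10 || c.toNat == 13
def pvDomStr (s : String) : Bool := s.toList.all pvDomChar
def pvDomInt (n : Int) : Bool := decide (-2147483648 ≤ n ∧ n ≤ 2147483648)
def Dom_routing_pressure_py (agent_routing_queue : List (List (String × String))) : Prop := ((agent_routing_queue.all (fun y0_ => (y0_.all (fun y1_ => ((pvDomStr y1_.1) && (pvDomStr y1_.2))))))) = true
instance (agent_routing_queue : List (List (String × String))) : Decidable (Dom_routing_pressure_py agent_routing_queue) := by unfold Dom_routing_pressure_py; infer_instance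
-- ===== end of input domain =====

-- B replaces A's two any()-scans with one single pass (early return on "investigate_now",
-- found_soon flag otherwise); objective: simpler, same cost.

-- dict lookup item["priority_band"]: first match in the association list; none = KeyError
def pvBand (item : List (String × String)) : Option String :=
  (item.find? (fun p => p.1 == "priority_band")).map Prod.snd

-- ===== PORT A =====
-- any(item["priority_band"] == b for item in q), short-circuit; none = KeyError raised mid-scan
def pvAnyBand (q : List (List (String × String))) (b : String) : Option Bool :=
  match q with
  | [] => some false
  | item :: rest =>
    match pvBand item with
    | none => none
    | some v => if v == b then some true else pvAnyBand rest b

def routing_pressure_py (agent_routing_queue : List (List (String × String))) : String :=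
  match pvAnyBand agent_routing_queue "investigate_now" with
  | none => "KeyError"   -- Python raises here; excluded by Pre_
  | some true => "investigate_now"
  | some false =>
    match pvAnyBand agent_routing_queue "investigate_soon" with
    | none => "KeyError" -- Python raises here; excluded by Pre_
    | some true => "investigate_soon"
    | some false => if agent_routing_queue ≠ [] then "watch_only" else "none"

-- ===== PORT B =====
-- the single for-loop of Source B with accumulator found_soon; dflt is the after-loop
-- value (watch_only / none, decided by the queue's emptiness)
def pvLoopB (q : List (List (String × String))) (found_soon : Bool) (dflt : String) : String :=
  match q with
  | [] => if found_soon then "investigate_soon" else dflt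
  | item :: rest =>
    match pvBand item with
    | none => "KeyError" -- Python raises here; excluded by Pre_
    | some band =>
      if band == "investigate_now" then "investigate_now"
      else pvLoopB rest (found_soon || (band == "investigate_soon")) dflt

def routing_pressure_py_alt (agent_routing_queue : List (List (String × String))) : String :=
  pvLoopB agent_routing_queue false
    (if agent_routing_queue ≠ [] then "watch_only" else "none")

-- ===== PRECONDITION & SPEC =====
-- Pre_ = exactly the inputs where Python A returns normally (no KeyError): every item has
-- the key "priority_band", or some item with band "investigate_now" is preceded only by
-- items that have the key (A's first any() short-circuits there).
def Pre_routing_pressure_py (agent_routing_queue : List (List (String × String))) : Prop :=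
  (∀ item ∈ agent_routing_queue, (pvBand item).isSome = true) ∨
  (∃ i < agent_routing_queue.length,
     pvBand (agent_routing_queue.getD i []) = some "investigate_now" ∧
     ∀ j < i, (pvBand (agent_routing_queue.getD j [])).isSome = true)

instance (agent_routing_queue : List (List (String × String))) : Decidable (Pre_routing_pressure_py agent_routing_queue) := by unfold Pre_routing_pressure_py; infer_instance

def pvWitness_routing_pressure_py : (List (List (String × String))) :=
  [[("priority_band", "investigate_soon")], [("priority_band", "watch")]]

def Spec_routing_pressure_py (agent_routing_queue : List (List (String × String))) (out : String) : Prop := out = routing_pressure_py_alt agent_routing_queue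
instance (agent_routing_queue : List (List (String × String))) (out : String) : Decidable (Spec_routing_pressure_py agent_routing_queue out) := by unfold Spec_routing_pressure_py; infer_instance

-- ===== CLAIM (what is proved, stated in full; the proofs are below) =====
def Claim_equal_routing_pressure_py : Prop := ∀ (agent_routing_queue : List (List (String × String))), Dom_routing_pressure_py agent_routing_queue → Pre_routing_pressure_py agent_routing_queue → Spec_routing_pressure_py agent_routing_queue (routing_pressure_py agent_routing_queue)

-- ===== LEMMAS AND PROOFS =====

-- if the first scan completes without finding "investigate_now", every key was present,
-- so the second scan cannot raise
theorem pvAnyBand_soon_isSome (q : List (List (String × String)))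
    (h : pvAnyBand q "investigate_now" = some false) :
    (pvAnyBand q "investigate_soon").isSome = true := by
  induction q with
  | nil => simp [pvAnyBand]
  | cons item rest ih =>
    simp only [pvAnyBand] at h ⊢
    cases hb : pvBand item with
    | none => simp [hb] at h
    | some v =>
      simp only [hb] at h ⊢
      by_cases hv : v == "investigate_now"
      · simp [hv] at h
      · simp only [hv] at h
        by_cases hs : v == "investigate_soon"
        · simp [hs]
        · simp [hs, ih h]

-- B's loop, characterised by A's two scans (for arbitrary flag and after-loop default)
theorem pvLoopB_eq (q : List (List (String × String))) (fs : Bool) (dflt : String) :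
    pvLoopB q fs dflt =
      match pvAnyBand q "investigate_now" with
      | none => "KeyError"
      | some true => "investigate_now"
      | some false =>
        if fs || (pvAnyBand q "investigate_soon").getD false then "investigate_soon" else dflt := by
  induction q generalizing fs with
  | nil => simp [pvLoopB, pvAnyBand]
  | cons item rest ih =>
    cases hb : pvBand item with
    | none => simp [pvLoopB, pvAnyBand, hb]
    | some band =>
      by_cases hn : band == "investigate_now"
      · simp [pvLoopB, pvAnyBand, hb, hn]
      · simp only [pvLoopB, pvAnyBand, hb, hn, if_false]
        rw [ih]
        cases pvAnyBand rest "investigate_now" with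
        | none => simp
        | some b =>
          cases b with
          | true => simp
          | false =>
            by_cases hs : band == "investigate_soon"
            · simp [hs]
            · simp [hs]

theorem routing_pressure_total_eq (q : List (List (String × String))) :
    routing_pressure_py q = routing_pressure_py_alt q := by
  unfold routing_pressure_py routing_pressure_py_alt
  rw [pvLoopB_eq]
  cases hnow : pvAnyBand q "investigate_now" with
  | none => rfl
  | some b =>
    cases b with
    | true => rfl
    | false =>
      have hs := pvAnyBand_soon_isSome q hnow
      cases hsoon : pvAnyBand q "investigate_soon" with
      | none => rw [hsoon] at hs; simp at hs
      | some c => cases c <;> simp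

-- ===== VERDICT (by name: the statement is the Claim_ definition above) =====
theorem routing_pressure_py_spec : Claim_equal_routing_pressure_py := by
  intro q _ _
  unfold Spec_routing_pressure_py
  exact routing_pressure_total_eq q
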